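-- pv_equiv track=rewrite | github.com/elektito/qbee | qbee/utils.py | split_camel
-- ===== SOURCE A (Python) =====
-- def split_camel(name):
--     """Split a camel/pascal case name into words. For exaple ExitSubStmt
-- is split into ['Exit', 'Sub', 'Stmt']."""
--
--     parts = []
--     cur = ''
--     for c in name:
--         if c.isupper() and cur:
--             parts.append(cur)
--             cur = ''
--         cur += c
--     if cur:
--         parts.append(cur)
--     return parts
-- ===== SOURCE B (Python) =====
-- def split_camel(name):
--     """Split a camel/pascal case name into words, recursively: peel off
-- the first word (first char plus following non-uppercase chars) and recurse."""
--     if not name: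
--         return []
--     rest = name[1:]
--     i = 0
--     while i < len(rest) and not rest[i].isupper():
--         i += 1
--     return [name[0] + rest[:i]] + split_camel(rest[i:])
-- ===== Notes on version B (the rewrite author's own statement) =====
-- stated objective: simpler
-- what changed: B replaces A's single pass with a running buffer/parts accumulator by a recursive decomposition: peel off the first word (head char plus the following non-uppercase run) by slicing and recurse on the remainder.
import Mathlib
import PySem

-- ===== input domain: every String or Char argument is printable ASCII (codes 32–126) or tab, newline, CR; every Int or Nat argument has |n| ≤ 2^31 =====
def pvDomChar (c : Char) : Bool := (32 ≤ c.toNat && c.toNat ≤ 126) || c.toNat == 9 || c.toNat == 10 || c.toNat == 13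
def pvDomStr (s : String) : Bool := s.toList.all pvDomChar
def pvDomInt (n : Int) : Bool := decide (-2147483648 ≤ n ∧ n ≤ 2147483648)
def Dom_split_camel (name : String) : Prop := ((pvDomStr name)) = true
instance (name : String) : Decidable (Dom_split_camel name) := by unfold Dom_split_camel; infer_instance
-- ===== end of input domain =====

-- B is a structurally different re-implementation (recursive peel-off-first-word by slicing
-- instead of A's one-pass buffer/parts accumulator); objective: simpler decomposition, same cost.

-- ===== PORT A =====
-- loop body of A: 'if c.isupper() and cur: parts.append(cur); cur = ""' then 'cur += c'
def pvStepA (st : List String × List Char) (c : Char) : List String × List Char :=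
  let st' := if PySem.Chars.isupper c && !st.2.isEmpty then
               (st.1 ++ [String.mk st.2], ([] : List Char)) else st
  (st'.1, st'.2 ++ [c])

def split_camel (name : String) : List String :=
  let r := name.toList.foldl pvStepA ([], [])
  if !r.2.isEmpty then r.1 ++ [String.mk r.2] else r.1

-- ===== PORT B =====
-- Source B's while loop advances i over the non-uppercase run of rest, so
-- rest[:i] = takeWhile (not isupper) and rest[i:] = dropWhile (not isupper).
def pvAltGo : List Char → List String
  | [] => []
  | c :: rest =>
      String.mk (c :: rest.takeWhile (fun d => !PySem.Chars.isupper d)) ::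
      pvAltGo (rest.dropWhile (fun d => !PySem.Chars.isupper d))
termination_by cs => cs.length
decreasing_by
  exact Nat.lt_succ_of_le (List.length_dropWhile_le _ _)

def split_camel_alt (name : String) : List String := pvAltGo name.toList

-- ===== PRECONDITION & SPEC =====
def Spec_split_camel (name : String) (out : List String) : Prop := out = split_camel_alt name
instance (name : String) (out : List String) : Decidable (Spec_split_camel name out) := by unfold Spec_split_camel; infer_instance

-- ===== CLAIM (what is proved, stated in full; the proofs are below) =====
def Claim_equal_split_camel : Prop := ∀ (name : String), Dom_split_camel name → Spec_split_camel name (split_camel name)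

-- ===== LEMMAS AND PROOFS =====

-- finishing step of A: 'if cur: parts.append(cur)'
def pvFinish (st : List String × List Char) : List String :=
  if !st.2.isEmpty then st.1 ++ [String.mk st.2] else st.1

lemma pvFoldA (cs : List Char) : ∀ (parts : List String) (cur : List Char), cur ≠ [] →
    pvFinish (cs.foldl pvStepA (parts, cur))
      = parts ++ String.mk (cur ++ cs.takeWhile (fun d => !PySem.Chars.isupper d))
          :: pvAltGo (cs.dropWhile (fun d => !PySem.Chars.isupper d)) := by
  induction cs with
  | nil =>
      intro parts cur h
      simp [pvFinish, pvAltGo, h]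
  | cons c rest ih =>
      intro parts cur h
      by_cases hu : PySem.Chars.isupper c = true
      · have : (c :: rest).foldl pvStepA (parts, cur)
            = rest.foldl pvStepA (parts ++ [String.mk cur], [c]) := by
          simp [pvStepA, h, hu]
        rw [this, ih (parts ++ [String.mk cur]) [c] (by simp)]
        simp [List.takeWhile, List.dropWhile, hu, pvAltGo]
      · have hu' : PySem.Chars.isupper c = false := by
          cases hh : PySem.Chars.isupper c <;> simp_all
        have : (c :: rest).foldl pvStepA (parts, cur)
            = rest.foldl pvStepA (parts, cur ++ [c]) := by
          simp [pvStepA, hu']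
        rw [this, ih parts (cur ++ [c]) (by simp)]
        simp [List.takeWhile, List.dropWhile, hu']

lemma pvMain (cs : List Char) :
    pvFinish (cs.foldl pvStepA ([], [])) = pvAltGo cs := by
  cases cs with
  | nil => simp [pvFinish, pvAltGo]
  | cons c rest =>
      have : (c :: rest).foldl pvStepA ([], []) = rest.foldl pvStepA ([], [c]) := by
        simp [pvStepA]
      rw [this, pvFoldA rest [] [c] (by simp), pvAltGo]
      simp

-- ===== VERDICT (by name: the statement is the Claim_ definition above) =====
theorem split_camel_spec : Claim_equal_split_camel := by
  intro name _
  show split_camel name = split_camel_alt name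
  simpa [split_camel, split_camel_alt, pvFinish] using pvMain name.toList
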